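-- pv_equiv track=rewrite | github.com/lelo03/lelo | SPCC/withoutArgument.py | expand_macro
-- ===== SOURCE A (Python) =====
-- def expand_macro(source_code, macro_definitions):
--     expanded_code = []
--     macro_calls = 0
--     total_instructions = 0
--
--     for line in source_code:
--         if line.strip() in macro_definitions:
--             macro_calls += 1
--             macro_body = macro_definitions[line.strip()]
--             expanded_code.extend(macro_body)
--             total_instructions += len(macro_body)
--         else:
--             expanded_code.append(line)
--             total_instructions += 1
--
--     return expanded_code, macro_calls, total_instructions
-- ===== SOURCE B (Python) =====
-- def expand_macro(source_code, macro_definitions):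
--     # Divide-and-conquer: split the source in half, expand each half
--     # independently, and combine the three results; the combine step is just
--     # concatenation/addition because expansion is line-local.
--     n = len(source_code)
--     if n == 0:
--         return [], 0, 0
--     if n == 1:
--         key = source_code[0].strip()
--         if key in macro_definitions:
--             body = macro_definitions[key]
--             return list(body), 1, len(body)
--         return [source_code[0]], 0, 1
--     mid = n // 2
--     l_code, l_calls, l_total = expand_macro(source_code[:mid], macro_definitions)
--     r_code, r_calls, r_total = expand_macro(source_code[mid:], macro_definitions)
--     return l_code + r_code, l_calls + r_calls, l_total + r_total
-- ===== Notes on version B (the rewrite author's own statement) =====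
-- stated objective: alternative
-- what changed: Replaces A's single left-to-right stateful loop by a divide-and-conquer recursion: split the source in half, expand each half independently, and combine halves by list concatenation and count addition (correct because macro expansion is line-local).
import Mathlib
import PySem

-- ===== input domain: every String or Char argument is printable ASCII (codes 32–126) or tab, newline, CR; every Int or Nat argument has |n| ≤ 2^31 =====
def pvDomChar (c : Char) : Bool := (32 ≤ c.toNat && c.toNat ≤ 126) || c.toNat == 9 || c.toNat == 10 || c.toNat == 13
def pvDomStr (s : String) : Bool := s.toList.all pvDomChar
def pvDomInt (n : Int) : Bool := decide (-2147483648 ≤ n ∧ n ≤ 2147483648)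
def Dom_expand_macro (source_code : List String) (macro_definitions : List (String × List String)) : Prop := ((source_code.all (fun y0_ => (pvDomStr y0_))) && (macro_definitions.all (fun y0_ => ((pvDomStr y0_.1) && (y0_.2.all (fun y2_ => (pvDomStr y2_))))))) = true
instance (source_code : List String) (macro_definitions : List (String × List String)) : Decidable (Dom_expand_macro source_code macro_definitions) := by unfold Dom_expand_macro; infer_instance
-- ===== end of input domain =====

-- B replaces A's single left-to-right stateful loop by a divide-and-conquer
-- recursion (split in half, expand halves, concatenate/add); objective: alternative.

-- dict membership/lookup on the association list (first match, per the type convention)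
def mdGet? (macro_definitions : List (String × List String)) (k : String) : Option (List String) :=
  (macro_definitions.find? (fun p => p.1 == k)).map (·.2)

-- ===== PORT A =====
def expand_macro (source_code : List String) (macro_definitions : List (String × List String)) : List String × Int × Int :=
  source_code.foldl (fun st line =>
    match mdGet? macro_definitions (PySem.Str.strip line) with
    | some macro_body => (st.1 ++ macro_body, st.2.1 + 1, st.2.2 + (macro_body.length : Int))
    | none => (st.1 ++ [line], st.2.1, st.2.2 + 1)) ([], 0, 0)

-- ===== PORT B =====
-- Python's source_code[0] on a length-1 list is the head (headI is exact here);
-- source_code[:mid]/source_code[mid:] with 0 ≤ mid ≤ n are take/drop.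
def expand_macro_alt (source_code : List String) (macro_definitions : List (String × List String)) : List String × Int × Int :=
  if source_code.length = 0 then ([], 0, 0)
  else if source_code.length = 1 then
    match mdGet? macro_definitions (PySem.Str.strip source_code.headI) with
    | some body => (body, 1, (body.length : Int))
    | none => ([source_code.headI], 0, 1)
  else
    let mid := source_code.length / 2
    let l := expand_macro_alt (source_code.take mid) macro_definitions
    let r := expand_macro_alt (source_code.drop mid) macro_definitions
    (l.1 ++ r.1, l.2.1 + r.2.1, l.2.2 + r.2.2)
termination_by source_code.length
decreasing_by
  · simp only [List.length_take]; omega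
  · simp only [List.length_drop]; omega

-- ===== PRECONDITION & SPEC =====
def Spec_expand_macro (source_code : List String) (macro_definitions : List (String × List String)) (out : List String × Int × Int) : Prop := out = expand_macro_alt source_code macro_definitions
instance (source_code : List String) (macro_definitions : List (String × List String)) (out : List String × Int × Int) : Decidable (Spec_expand_macro source_code macro_definitions out) := by unfold Spec_expand_macro; infer_instance

-- ===== CLAIM (what is proved, stated in full; the proofs are below) =====
def Claim_equal_expand_macro : Prop := ∀ (source_code : List String) (macro_definitions : List (String × List String)), Dom_expand_macro source_code macro_definitions → Spec_expand_macro source_code macro_definitions (expand_macro source_code macro_definitions)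

-- ===== LEMMAS AND PROOFS =====

-- the expansion of one line, and the canonical (order-free) form both ports equal
def exp1 (macro_definitions : List (String × List String)) (line : String) : List String :=
  match mdGet? macro_definitions (PySem.Str.strip line) with
  | some body => body
  | none => [line]

def canon (source_code : List String) (macro_definitions : List (String × List String)) : List String × Int × Int :=
  (source_code.flatMap (exp1 macro_definitions),
   (source_code.countP (fun l => (mdGet? macro_definitions (PySem.Str.strip l)).isSome) : Int),
   ((source_code.flatMap (exp1 macro_definitions)).length : Int))

-- A's loop from an arbitrary accumulator equals the accumulator combined with canon.
theorem expand_macro_loop (macro_definitions : List (String × List String))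
    (source_code : List String) (acc : List String) (c t : Int) :
    source_code.foldl (fun st line =>
      match mdGet? macro_definitions (PySem.Str.strip line) with
      | some macro_body => (st.1 ++ macro_body, st.2.1 + 1, st.2.2 + (macro_body.length : Int))
      | none => (st.1 ++ [line], st.2.1, st.2.2 + 1)) (acc, c, t)
    = (acc ++ (canon source_code macro_definitions).1,
       c + (canon source_code macro_definitions).2.1,
       t + (canon source_code macro_definitions).2.2) := by
  induction source_code generalizing acc c t with
  | nil => simp [canon]
  | cons line rest ih =>
    cases h : mdGet? macro_definitions (PySem.Str.strip line) with
    | some body =>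
      simp only [List.foldl_cons, h]
      rw [ih]
      simp [canon, exp1, h]
      constructor
      · ring
      · ring
    | none =>
      simp only [List.foldl_cons, h]
      rw [ih]
      simp [canon, exp1, h]
      ring

theorem a_eq_canon (source_code : List String) (macro_definitions : List (String × List String)) :
    expand_macro source_code macro_definitions = canon source_code macro_definitions := by
  rw [expand_macro, expand_macro_loop]; simp

-- canon is a homomorphism for ++ : the combine step of B is correct.
theorem canon_append (xs ys : List String) (macro_definitions : List (String × List String)) :
    canon (xs ++ ys) macro_definitions
    = ((canon xs macro_definitions).1 ++ (canon ys macro_definitions).1,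
       (canon xs macro_definitions).2.1 + (canon ys macro_definitions).2.1,
       (canon xs macro_definitions).2.2 + (canon ys macro_definitions).2.2) := by
  simp [canon, List.countP_append]

theorem alt_eq_canon (source_code : List String) (macro_definitions : List (String × List String)) :
    expand_macro_alt source_code macro_definitions = canon source_code macro_definitions := by
  rw [expand_macro_alt]
  split
  · next h0 =>
    have : source_code = [] := List.eq_nil_of_length_eq_zero h0
    subst this; simp [canon]
  · split
    · next h1 =>
      obtain ⟨a, ha⟩ := List.length_eq_one_iff.mp h1
      subst ha
      cases h : mdGet? macro_definitions (PySem.Str.strip ([a].headI)) with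
      | some body => simp_all [canon, exp1]
      | none => simp_all [canon, exp1]
    · next h0 h1 =>
      have hlt : source_code.length / 2 < source_code.length := by omega
      have hdl : (source_code.drop (source_code.length / 2)).length < source_code.length := by
        simp only [List.length_drop]; omega
      have htl : (source_code.take (source_code.length / 2)).length < source_code.length := by
        simp only [List.length_take]; omega
      show ((expand_macro_alt (source_code.take (source_code.length / 2)) macro_definitions).1 ++
             (expand_macro_alt (source_code.drop (source_code.length / 2)) macro_definitions).1,
            (expand_macro_alt (source_code.take (source_code.length / 2)) macro_definitions).2.1 +
             (expand_macro_alt (source_code.drop (source_code.length / 2)) macro_definitions).2.1,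
            (expand_macro_alt (source_code.take (source_code.length / 2)) macro_definitions).2.2 +
             (expand_macro_alt (source_code.drop (source_code.length / 2)) macro_definitions).2.2)
            = canon source_code macro_definitions
      rw [alt_eq_canon (source_code.take (source_code.length / 2)) macro_definitions,
          alt_eq_canon (source_code.drop (source_code.length / 2)) macro_definitions]
      conv_rhs => rw [← List.take_append_drop (source_code.length / 2) source_code]
      rw [canon_append]
termination_by source_code.length
decreasing_by
  · simp only [List.length_take]; omega
  · simp only [List.length_drop]; omega

-- ===== VERDICT (by name: the statement is the Claim_ definition above) =====
theorem expand_macro_spec : Claim_equal_expand_macro := by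
  intro source_code macro_definitions _
  show expand_macro source_code macro_definitions = _
  rw [a_eq_canon, alt_eq_canon]
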